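-- pv_equiv track=rewrite | github.com/GitofHJH/Programmers-with-Python | Level_1/1-1 신고결과받기.py | solution
-- ===== SOURCE A (Python) =====
-- def solution(id_list, report, k):
--     reportHash = {}
--     resultHash = {}
--
--     for i in report:
--         user, bad = i.split(" ")
--         if user not in reportHash:
--             reportHash[user] = set()
--         reportHash[user].add(bad)
--         if bad not in resultHash:
--             resultHash[bad] = set()
--         resultHash[bad].add(user)
--
--     answer=[0 for _ in range(len(id_list))]
--     for i in range(len(id_list)):
--         user = id_list[i]
--         if user not in reportHash:
--             continue
--
--         for bad in reportHash[user]: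
--             if len(resultHash[bad]) >= k:
--                 answer[i] += 1
--
--     return answer
-- ===== SOURCE B (Python) =====
-- def solution(id_list, report, k):
--     pairs = set()
--     for r in report:
--         user, bad = r.split(" ")
--         pairs.add((user, bad))
--     cnt = {}
--     for user, bad in pairs:
--         cnt[bad] = cnt.get(bad, 0) + 1
--     banned = {bad for bad, c in cnt.items() if c >= k}
--     answer = {i: 0 for i in id_list}
--     for user, bad in pairs:
--         if bad in banned and user in answer:
--             answer[user] += 1
--     return [answer[i] for i in id_list]
-- ===== Notes on version B (the rewrite author's own statement) =====
-- stated objective: alternative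
-- what changed: A builds two dicts of sets (user->bads, bad->reporters) and nests a loop over each user's reported set inside the answer loop; B instead dedupes the reports into a set of unique (user,bad) pairs, counts distinct reporters per bad with a plain counter dict, precomputes the banned set, and makes one pass over the unique pairs incrementing a per-user answer dict.
import Mathlib
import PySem

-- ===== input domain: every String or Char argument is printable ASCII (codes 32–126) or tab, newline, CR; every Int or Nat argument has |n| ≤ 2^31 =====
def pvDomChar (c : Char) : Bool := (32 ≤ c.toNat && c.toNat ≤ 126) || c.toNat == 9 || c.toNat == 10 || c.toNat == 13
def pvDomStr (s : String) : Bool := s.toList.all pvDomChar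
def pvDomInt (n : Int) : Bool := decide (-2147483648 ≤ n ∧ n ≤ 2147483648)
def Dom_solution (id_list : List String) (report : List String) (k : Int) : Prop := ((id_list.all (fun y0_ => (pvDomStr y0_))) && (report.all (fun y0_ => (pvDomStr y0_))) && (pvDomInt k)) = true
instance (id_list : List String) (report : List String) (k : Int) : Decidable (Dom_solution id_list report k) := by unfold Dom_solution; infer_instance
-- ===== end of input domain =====

-- B replaces A's two dicts-of-sets and nested answer loop by a deduped set of (user,bad)
-- pairs, a reporter counter, a precomputed banned set and one pass over the unique pairs.

-- shared helper: 'user, bad = i.split(" ")' — both Pythons parse a report line this way.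
-- Under Pre_solution the split has exactly two pieces; the ("","") default is never reached there.
def parsePair (r : String) : String × String :=
  match PySem.Str.split? r " " with
  | some [u, b] => (u, b)
  | _ => ("", "")

-- ===== PORT A =====
-- one iteration of A's first loop (both 'if … not in …: … = set()' branches kept)
def stepA (st : PySem.Dict String (PySem.Set String) × PySem.Dict String (PySem.Set String))
    (p : String × String) :
    PySem.Dict String (PySem.Set String) × PySem.Dict String (PySem.Set String) :=
  let rh := if st.1.contains p.1 then st.1 else st.1.insert p.1 PySem.Set.empty
  let rh := rh.insert p.1 (PySem.Set.add (rh.getD p.1 PySem.Set.empty) p.2)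
  let sh := if st.2.contains p.2 then st.2 else st.2.insert p.2 PySem.Set.empty
  let sh := sh.insert p.2 (PySem.Set.add (sh.getD p.2 PySem.Set.empty) p.1)
  (rh, sh)

def solution (id_list : List String) (report : List String) (k : Int) : List Int :=
  let st := report.foldl (fun st r => stepA st (parsePair r)) (PySem.Dict.empty, PySem.Dict.empty)
  let answer : List Int := (List.range id_list.length).map (fun _ => (0 : Int))
  -- i ranges over 0..len-1, so answer[i] / answer[i] += 1 are ported with getD/set (exact
  -- for these indices); resultHash[bad] is ported with getD (the key is present whenever
  -- this line runs, as bad was put into resultHash together with reportHash[user]);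
  -- the inner 'for bad in reportHash[user]' consumes a set only through an
  -- order-independent count, so folding the stored element list is exact.
  (List.range id_list.length).foldl (fun ans i =>
    match st.1.get? (id_list.getD i "") with
    | none => ans
    | some bads =>
        bads.foldl (fun a b =>
          if k ≤ PySem.Set.len (st.2.getD b PySem.Set.empty)
          then a.set i (a.getD i 0 + 1) else a) ans) answer

-- ===== PORT B =====
def solution_alt (id_list : List String) (report : List String) (k : Int) : List Int :=
  let pairs : PySem.Set (String × String) :=
    report.foldl (fun s r => PySem.Set.add s (parsePair r)) PySem.Set.empty
  let cnt : PySem.Dict String Int :=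
    pairs.foldl (fun d p => d.insert p.2 (d.getD p.2 0 + 1)) PySem.Dict.empty
  let banned : PySem.Set String :=
    PySem.Set.ofList ((cnt.items.filter (fun pc => k ≤ pc.2)).map (·.1))
  let answer0 : PySem.Dict String Int :=
    id_list.foldl (fun d u => d.insert u 0) PySem.Dict.empty
  let answer := pairs.foldl (fun d p =>
      if PySem.Set.contains banned p.2 && d.contains p.1
      then d.insert p.1 (d.getD p.1 0 + 1) else d) answer0
  id_list.map (fun u => answer.getD u 0)

-- ===== PRECONDITION & SPEC =====
-- Pre_ excludes exactly the report lines on which 'user, bad = i.split(" ")' raises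
-- ValueError (a line without exactly one space); both A and B raise there.
def Pre_solution (_id_list : List String) (report : List String) (_k : Int) : Prop :=
  ∀ r ∈ report, ((PySem.Str.split? r " ").getD []).length = 2
instance (id_list : List String) (report : List String) (k : Int) : Decidable (Pre_solution id_list report k) := by unfold Pre_solution; infer_instance
def pvWitness_solution : List String × List String × Int :=
  (["muzi", "frodo", "apeach", "neo"],
   ["muzi frodo", "apeach frodo", "frodo neo", "muzi neo", "apeach muzi"], 2)

def Spec_solution (id_list : List String) (report : List String) (k : Int) (out : List Int) : Prop := out = solution_alt id_list report k
instance (id_list : List String) (report : List String) (k : Int) (out : List Int) : Decidable (Spec_solution id_list report k out) := by unfold Spec_solution; infer_instance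

-- ===== CLAIM (what is proved, stated in full; the proofs are below) =====
def Claim_equal_solution : Prop := ∀ (id_list : List String) (report : List String) (k : Int), Dom_solution id_list report k → Pre_solution id_list report k → Spec_solution id_list report k (solution id_list report k)

-- ===== LEMMAS AND PROOFS =====

-- the common semantic core both programs compute: the deduped (user, bad) pair list,
-- the per-bad 'banned' test, and the per-user count of banned unique pairs
def pvP (report : List String) : List (String × String) :=
  PySem.List.dedup (report.map parsePair)
def pvCond (report : List String) (k : Int) (b : String) : Bool :=
  decide (k ≤ (((pvP report).countP (fun q => q.2 == b) : Nat) : Int))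
def pvSpec (id_list report : List String) (k : Int) : List Int :=
  id_list.map (fun u => (((pvP report).countP (fun p => p.1 == u && pvCond report k p.2) : Nat) : Int))
theorem foldl_add_filter {α : Type} [BEq α] [LawfulBEq α] (q : α → Bool) :
    ∀ (l acc : List α),
    (l.filter q).foldl PySem.Set.add (acc.filter q) = (l.foldl PySem.Set.add acc).filter q := by
  intro l
  induction l with
  | nil => intro acc; simp
  | cons x t ih =>
    intro acc
    have hstep : List.filter q (PySem.Set.add acc x) =
        if q x then PySem.Set.add (List.filter q acc) x else List.filter q acc := by
      simp only [PySem.Set.add, PySem.Set.contains]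
      by_cases hm : x ∈ acc
      · have h1 : acc.contains x = true := List.contains_iff_mem.mpr hm
        by_cases hq : q x
        · have h2 : (List.filter q acc).contains x = true :=
            List.contains_iff_mem.mpr (List.mem_filter.mpr ⟨hm, hq⟩)
          rw [if_pos h1, hq, if_pos rfl, if_pos h2]
        · rw [if_pos h1, if_neg hq]
      · have h1 : acc.contains x = false := by
          rw [Bool.eq_false_iff]; intro h; exact hm (List.contains_iff_mem.mp h)
        rw [if_neg (ne_true_of_eq_false h1), List.filter_append]
        by_cases hq : q x
        · have h2 : (List.filter q acc).contains x = false := by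
            rw [Bool.eq_false_iff]; intro h
            exact hm (List.mem_filter.mp (List.contains_iff_mem.mp h)).1
          rw [hq, if_pos rfl, if_neg (ne_true_of_eq_false h2)]
          simp [hq]
        · rw [if_neg hq]
          simp [hq]
    simp only [List.foldl_cons]
    rw [← ih (PySem.Set.add acc x), hstep]
    by_cases hq : q x <;> simp [hq, List.foldl_cons]

theorem dedup_filter {α : Type} [BEq α] [LawfulBEq α] (q : α → Bool) (l : List α) :
    PySem.List.dedup (l.filter q) = (PySem.List.dedup l).filter q := by
  have h := foldl_add_filter q l []
  simpa [PySem.List.dedup_eq_ofList, PySem.Set.ofList_eq_foldl] using h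

theorem foldl_add_map {α β : Type} [BEq α] [LawfulBEq α] [BEq β] [LawfulBEq β] (f : α → β) :
    ∀ (l acc : List α), (∀ a ∈ acc ++ l, ∀ b ∈ acc ++ l, f a = f b → a = b) →
    (l.map f).foldl PySem.Set.add (acc.map f) = (l.foldl PySem.Set.add acc).map f := by
  intro l
  induction l with
  | nil => intro acc _; simp
  | cons x t ih =>
    intro acc hinj
    have hx : x ∈ acc ++ x :: t := by simp
    have hcont : (acc.map f).contains (f x) = acc.contains x := by
      by_cases hm : x ∈ acc
      · rw [List.contains_iff_mem.mpr hm,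
          List.contains_iff_mem.mpr (List.mem_map.mpr ⟨x, hm, rfl⟩)]
      · have h1 : acc.contains x = false := by
          rw [Bool.eq_false_iff]; intro h; exact hm (List.contains_iff_mem.mp h)
        have h2 : (acc.map f).contains (f x) = false := by
          rw [Bool.eq_false_iff]; intro h
          rcases List.mem_map.mp (List.contains_iff_mem.mp h) with ⟨a, ha, hfa⟩
          have : a = x := hinj a (by simp [ha]) x hx hfa
          exact hm (this ▸ ha)
        rw [h1, h2]
    have hstep : PySem.Set.add (acc.map f) (f x) = (PySem.Set.add acc x).map f := by
      simp only [PySem.Set.add, PySem.Set.contains, hcont]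
      by_cases hc : acc.contains x
      · rw [if_pos hc, if_pos hc]
      · rw [if_neg hc, if_neg hc, List.map_append, List.map_cons, List.map_nil]
    simp only [List.map_cons, List.foldl_cons]
    rw [hstep, ih (PySem.Set.add acc x)]
    intro a ha b hb hfab
    have hsub : ∀ c, c ∈ PySem.Set.add acc x ++ t → c ∈ acc ++ x :: t := by
      intro c hcmem
      rcases List.mem_append.mp hcmem with h | h
      · simp only [PySem.Set.add] at h
        split at h
        · exact List.mem_append.mpr (Or.inl h)
        · rcases List.mem_append.mp h with h' | h'
          · exact List.mem_append.mpr (Or.inl h')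
          · simp at h'; simp [h']
      · simp [List.mem_append, h]
    exact hinj a (hsub a ha) b (hsub b hb) hfab
theorem stepA_eq (st : PySem.Dict String (PySem.Set String) × PySem.Dict String (PySem.Set String))
    (p : String × String) :
    stepA st p =
      (st.1.insert p.1 (PySem.Set.add (st.1.getD p.1 PySem.Set.empty) p.2),
       st.2.insert p.2 (PySem.Set.add (st.2.getD p.2 PySem.Set.empty) p.1)) := by
  unfold stepA
  have h1 : (if st.1.contains p.1 then st.1 else st.1.insert p.1 PySem.Set.empty).insert p.1
      (PySem.Set.add ((if st.1.contains p.1 then st.1 else st.1.insert p.1 PySem.Set.empty).getD p.1 PySem.Set.empty) p.2)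
      = st.1.insert p.1 (PySem.Set.add (st.1.getD p.1 PySem.Set.empty) p.2) := by
    by_cases hc : st.1.contains p.1
    · rw [if_pos hc]
    · rw [if_neg hc, PySem.Dict.getD_insert_self, PySem.Dict.insert_insert_self,
        PySem.Dict.getD_of_not_contains _ _ (Bool.not_eq_true _ ▸ hc)]
  have h2 : (if st.2.contains p.2 then st.2 else st.2.insert p.2 PySem.Set.empty).insert p.2
      (PySem.Set.add ((if st.2.contains p.2 then st.2 else st.2.insert p.2 PySem.Set.empty).getD p.2 PySem.Set.empty) p.1)
      = st.2.insert p.2 (PySem.Set.add (st.2.getD p.2 PySem.Set.empty) p.1) := by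
    by_cases hc : st.2.contains p.2
    · rw [if_pos hc]
    · rw [if_neg hc, PySem.Dict.getD_insert_self, PySem.Dict.insert_insert_self,
        PySem.Dict.getD_of_not_contains _ _ (Bool.not_eq_true _ ▸ hc)]
  simp only [h1, h2]

theorem foldA_fst_getD :
    ∀ (l : List (String × String)) (st : PySem.Dict String (PySem.Set String) × PySem.Dict String (PySem.Set String)) (u : String),
    ((l.foldl stepA st).1).getD u PySem.Set.empty
      = ((l.filter (fun p => p.1 == u)).map (·.2)).foldl PySem.Set.add (st.1.getD u PySem.Set.empty) := by
  intro l
  induction l with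
  | nil => intro st u; simp
  | cons p t ih =>
    intro st u
    simp only [List.foldl_cons, stepA_eq, List.filter_cons]
    rw [ih]
    by_cases h : p.1 = u
    · subst h
      simp only [beq_self_eq_true, if_pos, List.map_cons, List.foldl_cons,
        PySem.Dict.getD_insert_self]
    · have hb : (p.1 == u) = false := beq_eq_false_iff_ne.mpr h
      have hne : u ≠ p.1 := fun hh => h hh.symm
      simp only [hb, Bool.false_eq_true, PySem.Dict.getD_insert_of_ne _ _ _ hne]
      simp

theorem foldA_fst_contains :
    ∀ (l : List (String × String)) (st : PySem.Dict String (PySem.Set String) × PySem.Dict String (PySem.Set String)) (u : String),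
    ((l.foldl stepA st).1).contains u = (st.1.contains u || l.any (fun p => p.1 == u)) := by
  intro l
  induction l with
  | nil => intro st u; simp
  | cons p t ih =>
    intro st u
    simp only [List.foldl_cons, stepA_eq]
    rw [ih]
    simp only [PySem.Dict.contains_insert, List.any_cons]
    by_cases h : u = p.1
    · subst h
      simp
    · have : (u == p.1) = false := beq_eq_false_iff_ne.mpr h
      have hb : (p.1 == u) = false := beq_eq_false_iff_ne.mpr (fun hh => h hh.symm)
      simp [this, hb]

theorem foldA_snd_getD :
    ∀ (l : List (String × String)) (st : PySem.Dict String (PySem.Set String) × PySem.Dict String (PySem.Set String)) (b : String),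
    ((l.foldl stepA st).2).getD b PySem.Set.empty
      = ((l.filter (fun p => p.2 == b)).map (·.1)).foldl PySem.Set.add (st.2.getD b PySem.Set.empty) := by
  intro l
  induction l with
  | nil => intro st b; simp
  | cons p t ih =>
    intro st b
    simp only [List.foldl_cons, stepA_eq, List.filter_cons]
    rw [ih]
    by_cases h : p.2 = b
    · subst h
      simp only [beq_self_eq_true, if_pos, List.map_cons, List.foldl_cons,
        PySem.Dict.getD_insert_self]
    · have hb : (p.2 == b) = false := beq_eq_false_iff_ne.mpr h
      have hne : b ≠ p.2 := fun hh => h hh.symm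
      simp only [hb, Bool.false_eq_true, PySem.Dict.getD_insert_of_ne _ _ _ hne]
      simp
-- A's inner loop: conditional increments at a fixed index collapse to one set
theorem foldl_set_count (P : String → Prop) [DecidablePred P] :
    ∀ (bs : List String) (ans : List Int) (i : Nat), i < ans.length →
    bs.foldl (fun a b => if P b then a.set i (a.getD i 0 + 1) else a) ans
      = ans.set i (ans.getD i 0 + (bs.countP (fun b => decide (P b)) : Int)) := by
  intro bs
  induction bs with
  | nil =>
    intro ans i hi
    simp only [List.foldl_nil, List.countP_nil, Nat.cast_zero, add_zero]
    rw [List.getD_eq_getElem?_getD, List.getElem?_eq_getElem hi]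
    simp
  | cons b t ih =>
    intro ans i hi
    simp only [List.foldl_cons, List.countP_cons]
    by_cases hc : P b
    · rw [if_pos hc, ih _ i (by simpa using hi)]
      rw [List.set_set]
      have harr : (ans.set i (ans.getD i 0 + 1)).getD i 0 = ans.getD i 0 + 1 := by
        rw [List.getD_eq_getElem?_getD, List.getElem?_eq_getElem (by simpa using hi)]
        simp
      rw [harr]
      simp only [hc, decide_true, if_pos]
      congr 1
      push_cast
      ring
    · rw [if_neg hc, ih _ i hi]
      simp [hc]

-- A's outer loop over range(len(id_list))
theorem foldl_range_set (g : Nat → Int) (n : Nat) :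
    ∀ (m : Nat), m ≤ n →
    (List.range m).foldl (fun ans i => ans.set i (ans.getD i 0 + g i)) ((List.range n).map (fun _ => (0 : Int)))
      = (List.range n).map (fun j => if j < m then g j else 0) := by
  intro m
  induction m with
  | zero => intro _; simp
  | succ m ih =>
    intro hm
    rw [List.range_succ, List.foldl_append, ih (Nat.le_of_succ_le hm)]
    apply List.ext_getElem
    · simp
    · intro j hj1 hj2
      simp only at hj1
      have hmn : m < n := hm
      have hgetD : ((List.range n).map (fun j => if j < m then g j else 0)).getD m 0 = 0 := by
        rw [List.getD_eq_getElem?_getD, List.getElem?_eq_getElem (by simp [hmn]),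
          List.getElem_map]
        simp
      simp only [List.foldl_cons, List.foldl_nil, hgetD, zero_add]
      rw [List.getElem_set]
      simp only [List.getElem_map, List.getElem_range]
      by_cases h : m = j
      · subst h; simp
      · rw [if_neg h]
        by_cases h2 : j < m
        · rw [if_pos h2, if_pos (Nat.lt_succ_of_lt h2)]
        · rw [if_neg h2, if_neg (by omega)]

-- congruence for a fold whose steps agree on length-n states and in-range indices
theorem foldl_congr_length (n : Nat) (f g : List Int → Nat → List Int)
    (hf : ∀ ans i, ans.length = n → i < n → (f ans i).length = n)
    (heq : ∀ ans i, ans.length = n → i < n → f ans i = g ans i) :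
    ∀ (l : List Nat) (ans : List Int), (∀ i ∈ l, i < n) → ans.length = n →
    l.foldl f ans = l.foldl g ans := by
  intro l
  induction l with
  | nil => intro ans _ _; rfl
  | cons i t ih =>
    intro ans hl hlen
    have hi : i < n := hl i (by simp)
    simp only [List.foldl_cons]
    rw [← heq ans i hlen hi]
    exact ih (f ans i) (fun j hj => hl j (by simp [hj])) (hf ans i hlen hi)

-- … and the final per-user value is a countP over the pairs
theorem foldB_getD (c : String × String → Bool) :
    ∀ (l : List (String × String)) (d : PySem.Dict String Int) (u : String),
    (l.foldl (fun d p => if c p && d.contains p.1 then d.insert p.1 (d.getD p.1 0 + 1) else d) d).getD u 0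
      = d.getD u 0 + if d.contains u then (l.countP (fun p => c p && p.1 == u) : Int) else 0 := by
  intro l
  induction l with
  | nil => intro d u; simp
  | cons p t ih =>
    intro d u
    simp only [List.foldl_cons, List.countP_cons]
    rw [ih]
    by_cases hcp : (c p && d.contains p.1) = true
    · rw [if_pos hcp]
      have h' := hcp
      simp only [Bool.and_eq_true] at h'
      have hcu : (d.insert p.1 (d.getD p.1 0 + 1)).contains u = d.contains u := by
        rw [PySem.Dict.contains_insert]
        by_cases h : u = p.1
        · subst h; simp [h'.2]
        · simp [beq_eq_false_iff_ne.mpr h]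
      rw [hcu, PySem.Dict.getD_insert]
      by_cases h : u = p.1
      · subst h
        rw [if_pos rfl, if_pos h'.2, if_pos h'.2, h'.1, beq_self_eq_true]
        simp only [Bool.and_self, if_pos]
        push_cast
        ring
      · rw [if_neg h]
        have hff : (c p && (p.1 == u)) = false := by
          rw [beq_eq_false_iff_ne.mpr (fun hh => h hh.symm)]
          simp
        rw [hff]
        simp
    · rw [if_neg hcp]
      by_cases hcu : d.contains u = true
      · have hff : (c p && (p.1 == u)) = false := by
          by_cases h : u = p.1
          · subst h
            rcases Bool.eq_false_or_eq_true (c p) with hc | hc <;> simp_all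
          · rw [beq_eq_false_iff_ne.mpr (fun hh => h hh.symm)]; simp
        rw [hff, if_pos hcu, if_pos hcu]
        simp
      · rw [if_neg hcu, if_neg hcu]

-- the two dedup-commutations, specialised to the pair projections
theorem dedup_proj_snd (ps : List (String × String)) (u : String) :
    PySem.Set.ofList ((ps.filter (fun p => p.1 == u)).map (·.2))
      = ((PySem.List.dedup ps).filter (fun p => p.1 == u)).map (·.2) := by
  have hinj : ∀ a ∈ ([] : List (String × String)) ++ ps.filter (fun p => p.1 == u),
      ∀ b ∈ ([] : List (String × String)) ++ ps.filter (fun p => p.1 == u),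
      a.2 = b.2 → a = b := by
    intro a ha b hb hab
    simp only [List.nil_append, List.mem_filter, beq_iff_eq] at ha hb
    exact Prod.ext (ha.2.trans hb.2.symm) hab
  have h := foldl_add_map (fun p => p.2) (ps.filter (fun p => p.1 == u)) [] hinj
  simp only [List.map_nil] at h
  rw [PySem.Set.ofList_eq_foldl, h, ← dedup_filter]
  rw [PySem.List.dedup_eq_ofList, PySem.Set.ofList_eq_foldl]

theorem dedup_proj_fst (ps : List (String × String)) (b : String) :
    PySem.Set.ofList ((ps.filter (fun p => p.2 == b)).map (·.1))
      = ((PySem.List.dedup ps).filter (fun p => p.2 == b)).map (·.1) := by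
  have hinj : ∀ a ∈ ([] : List (String × String)) ++ ps.filter (fun p => p.2 == b),
      ∀ c ∈ ([] : List (String × String)) ++ ps.filter (fun p => p.2 == b),
      a.1 = c.1 → a = c := by
    intro a ha c hc hac
    simp only [List.nil_append, List.mem_filter, beq_iff_eq] at ha hc
    exact Prod.ext hac (ha.2.trans hc.2.symm)
  have h := foldl_add_map (fun p => p.1) (ps.filter (fun p => p.2 == b)) [] hinj
  simp only [List.map_nil] at h
  rw [PySem.Set.ofList_eq_foldl, h, ← dedup_filter]
  rw [PySem.List.dedup_eq_ofList, PySem.Set.ofList_eq_foldl]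

theorem solutionA_eq (id_list report : List String) (k : Int) :
    solution id_list report k = pvSpec id_list report k := by
  unfold solution
  have hfold : report.foldl (fun st r => stepA st (parsePair r))
        (PySem.Dict.empty, PySem.Dict.empty)
      = (report.map parsePair).foldl stepA (PySem.Dict.empty, PySem.Dict.empty) :=
    (List.foldl_map (f := parsePair) (g := stepA)).symm
  rw [hfold]
  set ps := report.map parsePair with hps
  set st := ps.foldl stepA (PySem.Dict.empty, PySem.Dict.empty) with hst
  set n := id_list.length with hn
  -- the per-bad condition A tests equals pvCond
  have hcond : ∀ b, (k ≤ PySem.Set.len (st.2.getD b PySem.Set.empty))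
      ↔ (pvCond report k b = true) := by
    intro b
    have h1 : st.2.getD b PySem.Set.empty
        = ((PySem.List.dedup ps).filter (fun p => p.2 == b)).map (·.1) := by
      rw [hst, foldA_snd_getD, PySem.Dict.getD_empty,
        show (PySem.Set.empty : PySem.Set String) = [] from rfl,
        ← PySem.Set.ofList_eq_foldl, dedup_proj_fst]
    rw [h1]
    unfold pvCond pvP
    rw [← hps]
    simp only [PySem.Set.len, List.length_map, List.countP_eq_length_filter, decide_eq_true_eq]
  -- the per-user count A computes
  have hcount : ∀ u bads, st.1.get? u = some bads →
      (bads.countP (fun b => decide (k ≤ PySem.Set.len (st.2.getD b PySem.Set.empty))) : Int)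
        = (((pvP report).countP (fun p => p.1 == u && pvCond report k p.2) : Nat) : Int) := by
    intro u bads hq
    have hbads : bads = ((PySem.List.dedup ps).filter (fun p => p.1 == u)).map (·.2) := by
      have : st.1.getD u PySem.Set.empty = bads := PySem.Dict.getD_of_get?_eq_some _ _ hq
      rw [← this, hst, foldA_fst_getD, PySem.Dict.getD_empty,
        show (PySem.Set.empty : PySem.Set String) = [] from rfl,
        ← PySem.Set.ofList_eq_foldl, dedup_proj_snd]
    rw [hbads, List.countP_map, List.countP_filter]
    congr 2
    funext p
    rw [Bool.eq_iff_iff]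
    simp only [Function.comp, Bool.and_eq_true, decide_eq_true_eq, hcond p.2]
    exact ⟨fun ⟨h1, h2⟩ => ⟨h2, h1⟩, fun ⟨h1, h2⟩ => ⟨h2, h1⟩⟩
  -- u absent from reportHash contributes 0
  have hzero : ∀ u, st.1.get? u = none →
      ((pvP report).countP (fun p => p.1 == u && pvCond report k p.2)) = 0 := by
    intro u hq
    have hc : st.1.contains u = false := (PySem.Dict.get?_eq_none_iff_contains _ _).mp hq
    rw [hst, foldA_fst_contains] at hc
    simp only [PySem.Dict.contains_empty, Bool.false_or] at hc
    rw [List.countP_eq_zero]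
    intro p hp
    have hpps : p ∈ ps := by
      have := (PySem.List.mem_dedup (report.map parsePair) p).mp hp
      rwa [← hps] at this
    have hff := (List.any_eq_false.mp hc) p hpps
    simp only [Bool.and_eq_true, not_and]
    intro hb _
    exact hff hb
  -- replace the loop body by a pure set at index i
  have hbody : ∀ (ans : List Int) (i : Nat), ans.length = n → i < n →
      (match st.1.get? (id_list.getD i "") with
       | none => ans
       | some bads =>
          bads.foldl (fun a b =>
            if k ≤ PySem.Set.len (st.2.getD b PySem.Set.empty)
            then a.set i (a.getD i 0 + 1) else a) ans)
      = ans.set i (ans.getD i 0 +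
          (((pvP report).countP
            (fun p => p.1 == id_list.getD i "" && pvCond report k p.2) : Nat) : Int)) := by
    intro ans i hlen hi
    cases hq : st.1.get? (id_list.getD i "") with
    | none =>
      show ans = _
      rw [hzero _ hq]
      simp only [Nat.cast_zero, add_zero]
      have hgd : ans.getD i 0 = ans[i]'(by omega) := by
        rw [List.getD_eq_getElem?_getD, List.getElem?_eq_getElem (by omega)]; rfl
      rw [hgd, List.set_getElem_self]
    | some bads =>
      show bads.foldl _ ans = _
      rw [foldl_set_count _ bads ans i (by omega), hcount _ bads hq]
  have hflen : ∀ (ans : List Int) (i : Nat), ans.length = n → i < n →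
      ((match st.1.get? (id_list.getD i "") with
       | none => ans
       | some bads =>
          bads.foldl (fun a b =>
            if k ≤ PySem.Set.len (st.2.getD b PySem.Set.empty)
            then a.set i (a.getD i 0 + 1) else a) ans) : List Int).length = n := by
    intro ans i hlen hi
    rw [hbody ans i hlen hi, List.length_set, hlen]
  rw [foldl_congr_length n _
      (fun ans i => ans.set i (ans.getD i 0 +
        (((pvP report).countP
          (fun p => p.1 == id_list.getD i "" && pvCond report k p.2) : Nat) : Int)))
      hflen hbody (List.range n) _ (fun i hi => List.mem_range.mp hi) (by simp),
    foldl_range_set _ n n le_rfl]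
  unfold pvSpec
  apply List.ext_getElem
  · simp [hn]
  · intro j hj1 hj2
    simp only [List.length_map, List.length_range] at hj1
    simp only [List.getElem_map, List.getElem_range, if_pos hj1]
    congr 2
    rw [List.getD_eq_getElem?_getD, List.getElem?_eq_getElem (by omega)]
    rfl

theorem foldl_insert_zero_getD :
    ∀ (l : List String) (d : PySem.Dict String Int), (∀ u, d.getD u 0 = 0) →
    ∀ u, (l.foldl (fun d x => d.insert x 0) d).getD u 0 = 0 := by
  intro l
  induction l with
  | nil => intro d h u; exact h u
  | cons x t ih =>
    intro d h u
    simp only [List.foldl_cons]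
    apply ih
    intro v
    rw [PySem.Dict.getD_insert]
    by_cases hv : v = x
    · rw [if_pos hv]
    · rw [if_neg hv]; exact h v

theorem foldl_insert_zero_contains :
    ∀ (l : List String) (d : PySem.Dict String Int) (u : String),
    (l.foldl (fun d x => d.insert x 0) d).contains u = (d.contains u || l.contains u) := by
  intro l
  induction l with
  | nil => intro d u; simp
  | cons x t ih =>
    intro d u
    simp only [List.foldl_cons]
    rw [ih, PySem.Dict.contains_insert]
    simp only [List.contains_cons]
    by_cases h : u = x
    · subst h; simp
    · simp [beq_eq_false_iff_ne.mpr h]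

theorem solutionB_eq (id_list report : List String) (k : Int) :
    solution_alt id_list report k = pvSpec id_list report k := by
  simp only [solution_alt]
  have hpairs : report.foldl (fun s r => PySem.Set.add s (parsePair r)) PySem.Set.empty
      = pvP report := by
    rw [pvP, PySem.List.dedup_eq_ofList, PySem.Set.ofList_eq_foldl,
      List.foldl_map (f := parsePair) (g := PySem.Set.add)]
    rfl
  rw [hpairs]
  set P := pvP report with hP
  -- cnt is Counter(second components of the unique pairs)
  have hcnt : P.foldl (fun d p => d.insert p.2 (d.getD p.2 0 + 1)) PySem.Dict.empty
      = PySem.Dict.counter (P.map (·.2)) := by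
    rw [← PySem.Dict.foldl_insert_getD_add_one_eq_counter]
    exact (List.foldl_map (f := fun p : String × String => p.2)
      (g := fun (d : PySem.Dict String Int) x => d.insert x (d.getD x 0 + 1)) (l := P)
      (init := PySem.Dict.empty)).symm
  rw [hcnt]
  -- membership in banned is exactly pvCond on the pair's second component
  have hcount_eq : ∀ b, List.count b (P.map (·.2)) = P.countP (fun q => q.2 == b) := by
    intro b
    rw [List.count_eq_countP, List.countP_map]
    rfl
  have hbanned : ∀ p ∈ P, PySem.Set.contains
      (PySem.Set.ofList ((((PySem.Dict.counter (P.map (·.2))).items.filter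
        (fun pc => k ≤ pc.2)).map (·.1)))) p.2 = pvCond report k p.2 := by
    intro p hp
    rw [Bool.eq_iff_iff]
    unfold PySem.Set.contains
    rw [List.contains_iff_mem, PySem.Set.mem_ofList, PySem.Dict.items_counter,
      List.filter_map]
    simp only [List.map_map, List.mem_map, List.mem_filter, Function.comp,
      decide_eq_true_eq, pvCond, ← hP]
    constructor
    · rintro ⟨b, ⟨hbmem, hkb⟩, hb⟩
      subst hb
      rw [← hcount_eq]
      exact hkb
    · intro h
      refine ⟨p.2, ⟨?_, by rw [hcount_eq]; exact h⟩, rfl⟩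
      rw [PySem.Set.mem_ofList]
      exact List.mem_map.mpr ⟨p, hp, rfl⟩
  -- the initial answer dict: every value 0, keys = id_list
  set answer0 : PySem.Dict String Int := id_list.foldl (fun d u => d.insert u 0) PySem.Dict.empty with ha0
  have h0getD : ∀ u, answer0.getD u 0 = 0 := by
    intro u
    rw [ha0]
    exact foldl_insert_zero_getD id_list PySem.Dict.empty
      (fun u => PySem.Dict.getD_empty u 0) u
  have h0contains : ∀ u, answer0.contains u = id_list.contains u := by
    intro u
    rw [ha0, foldl_insert_zero_contains, PySem.Dict.contains_empty, Bool.false_or]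
  -- the final per-user value
  rw [pvSpec]
  apply List.map_congr_left
  intro u hu
  rw [foldB_getD, h0getD, h0contains, List.contains_iff_mem.mpr hu, if_pos rfl, zero_add]
  congr 1
  apply List.countP_congr
  intro p hp
  rw [hbanned p hp]
  simp only [Bool.and_eq_true]
  constructor
  · rintro ⟨h1, h2⟩; exact ⟨h2, h1⟩
  · rintro ⟨h1, h2⟩; exact ⟨h2, h1⟩

-- ===== VERDICT (by name: the statement is the Claim_ definition above) =====
theorem solution_spec : Claim_equal_solution := by
  intro id_list report k _ _
  unfold Spec_solution
  rw [solutionA_eq, solutionB_eq]
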